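-- pv_equiv track=rewrite | github.com/Mestuq/SlazAI | slaz-AI/commandrecognazer.py | word_in_message
-- ===== SOURCE A (Python) =====
-- def word_in_message(mess,fixing):
--
--     # BIG to small letter
--     if fixing == False:
--         mess = mess.lower()
--
--     # Remove repeating letters
--     if fixing == False:
--         nowy=''
--         ostatnia=''
--         for i in mess:
--             if ostatnia != i:
--                 nowy+=str(i)
--                 ostatnia=i
--     else:
--         nowy = mess
--
--     # Pass all the punctuation marks
--     if fixing == False:
--         nowy = nowy.replace(",", " , ")
--         nowy = nowy.replace("#", " # ")
--         nowy = nowy.replace("?", " ? ")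
--         nowy = nowy.replace("!", " ! ")
--         nowy = nowy.replace(".", " . ")
--         nowy = nowy.replace("\"", " \" ")
--         nowy = nowy.replace("/", " / ")
--         nowy = nowy.replace("\\", " \\ ")
--
--     # return result
--     mess_tabela = nowy.split()
--     return mess_tabela
-- ===== SOURCE B (Python) =====
-- def word_in_message(mess, fixing):
--     # Single fused pass: lowercase, drop consecutive duplicates, pad punctuation.
--     if fixing != False:
--         return mess.split()
--     out = []
--     prev = None
--     for ch in mess.lower():
--         if ch == prev:
--             continue
--         prev = ch
--         out.append(' ' + ch + ' ' if ch in ',#?!."/\\' else ch)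
--     return ''.join(out).split()
-- ===== Notes on version B (the rewrite author's own statement) =====
-- stated objective: simpler
-- what changed: B fuses A's three separate passes (lowercase string, dedup loop, eight sequential .replace scans) into a single character loop that drops consecutive duplicates and appends the padded or plain character, then splits once.
import Mathlib
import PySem

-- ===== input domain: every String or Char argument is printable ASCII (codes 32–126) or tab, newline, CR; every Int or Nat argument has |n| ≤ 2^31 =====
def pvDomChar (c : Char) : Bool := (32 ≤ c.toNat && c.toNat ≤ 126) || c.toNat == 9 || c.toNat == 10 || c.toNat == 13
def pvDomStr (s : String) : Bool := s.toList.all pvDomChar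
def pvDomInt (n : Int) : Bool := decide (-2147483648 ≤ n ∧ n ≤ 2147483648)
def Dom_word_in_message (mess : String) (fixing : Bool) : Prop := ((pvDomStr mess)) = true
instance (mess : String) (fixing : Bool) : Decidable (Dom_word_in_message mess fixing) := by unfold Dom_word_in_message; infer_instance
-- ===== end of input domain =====

-- B fuses A's three passes (lowercase, consecutive-duplicate removal, punctuation padding) into one
-- character loop; objective: simpler (one fused loop, same asymptotic cost).

-- ===== PORT A =====
def word_in_message (mess : String) (fixing : Bool) : List String :=
  let mess := if fixing == false then PySem.Str.lower mess else mess
  let nowy : List Char :=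
    if fixing == false then
      (mess.toList.foldl
        (fun (st : List Char × Option Char) i =>
          if st.2 ≠ some i then (st.1 ++ [i], some i) else st)
        ([], none)).1
    else mess.toList
  let nowy : List Char :=
    if fixing == false then
      let n1 := PySem.Chars.replace nowy [','] [' ', ',', ' ']
      let n2 := PySem.Chars.replace n1 ['#'] [' ', '#', ' ']
      let n3 := PySem.Chars.replace n2 ['?'] [' ', '?', ' ']
      let n4 := PySem.Chars.replace n3 ['!'] [' ', '!', ' ']
      let n5 := PySem.Chars.replace n4 ['.'] [' ', '.', ' ']
      let n6 := PySem.Chars.replace n5 ['\"'] [' ', '\"', ' ']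
      let n7 := PySem.Chars.replace n6 ['/'] [' ', '/', ' ']
      PySem.Chars.replace n7 ['\\'] [' ', '\\', ' ']
    else nowy
  (PySem.Chars.split₀ nowy).map String.ofList

-- ===== PORT B =====
-- the padded form of one surviving character (B's inline conditional expression)
def pvPad (ch : Char) : List Char :=
  if ch ∈ [',', '#', '?', '!', '.', '\"', '/', '\\'] then [' ', ch, ' '] else [ch]

def word_in_message_alt (mess : String) (fixing : Bool) : List String :=
  if fixing != false then (PySem.Chars.split₀ mess.toList).map String.ofList
  else
    let out : List (List Char) :=
      ((PySem.Str.lower mess).toList.foldl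
        (fun (st : List (List Char) × Option Char) ch =>
          if some ch = st.2 then st
          else (st.1 ++ [pvPad ch], some ch))
        ([], none)).1
    (PySem.Chars.split₀ out.flatten).map String.ofList

-- ===== PRECONDITION & SPEC =====
def Spec_word_in_message (mess : String) (fixing : Bool) (out : List String) : Prop := out = word_in_message_alt mess fixing
instance (mess : String) (fixing : Bool) (out : List String) : Decidable (Spec_word_in_message mess fixing out) := by unfold Spec_word_in_message; infer_instance

-- ===== CLAIM (what is proved, stated in full; the proofs are below) =====
def Claim_equal_word_in_message : Prop := ∀ (mess : String) (fixing : Bool), Dom_word_in_message mess fixing → Spec_word_in_message mess fixing (word_in_message mess fixing)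

-- ===== LEMMAS AND PROOFS =====

-- replace with a single-character pattern is a per-character flatMap
theorem pv_go_single (p : Char) (new : List Char) :
    ∀ (s : List Char) (fuel : Nat) (acc : List Char), s.length ≤ fuel →
      PySem.Chars.replace.go [p] new fuel s acc
        = acc.reverse ++ s.flatMap (fun c => if c = p then new else [c]) := by
  intro s
  induction s with
  | nil =>
      intro fuel acc _
      cases fuel <;> simp [PySem.Chars.replace.go]
  | cons c t ih =>
      intro fuel acc h
      cases fuel with
      | zero => simp at h
      | succ f =>
          rw [PySem.Chars.replace.go]
          by_cases hpc : p = c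
          · subst hpc
            simp only [List.isPrefixOf, List.flatMap_cons]
            simp only [beq_self_eq_true, Bool.true_and, if_pos]
            have hd : List.drop (List.length [p]) (p :: t) = t := rfl
            rw [hd, ih f (new.reverse ++ acc) (by simpa using h)]
            simp
          · have : List.isPrefixOf [p] (c :: t) = false := by
              simp [List.isPrefixOf, hpc]
            rw [this]
            simp only [Bool.false_eq_true, if_false, List.flatMap_cons]
            rw [ih f (c :: acc) (by simpa using h)]
            simp [Ne.symm hpc]

theorem pv_replace_single (p : Char) (new : List Char) (s : List Char) :
    PySem.Chars.replace s [p] new = s.flatMap (fun c => if c = p then new else [c]) := by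
  rw [PySem.Chars.replace]
  simp only [List.isEmpty_cons, Bool.false_eq_true, if_false]
  simpa using pv_go_single p new s s.length [] le_rfl

-- the eight-fold replace chain is the per-character padding flatMap
theorem pv_chain_eq_flatMap (s : List Char) :
    PySem.Chars.replace
      (PySem.Chars.replace
        (PySem.Chars.replace
          (PySem.Chars.replace
            (PySem.Chars.replace
              (PySem.Chars.replace
                (PySem.Chars.replace
                  (PySem.Chars.replace s [','] [' ', ',', ' '])
                  ['#'] [' ', '#', ' '])
                ['?'] [' ', '?', ' '])
              ['!'] [' ', '!', ' '])
            ['.'] [' ', '.', ' '])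
          ['\"'] [' ', '\"', ' '])
        ['/'] [' ', '/', ' '])
      ['\\'] [' ', '\\', ' ']
    = s.flatMap pvPad := by
  simp only [pv_replace_single, List.flatMap_assoc]
  refine List.flatMap_congr (fun c _ => ?_)
  by_cases h1 : c = ','; · subst h1; decide
  by_cases h2 : c = '#'; · subst h2; decide
  by_cases h3 : c = '?'; · subst h3; decide
  by_cases h4 : c = '!'; · subst h4; decide
  by_cases h5 : c = '.'; · subst h5; decide
  by_cases h6 : c = '\"'; · subst h6; decide
  by_cases h7 : c = '/'; · subst h7; decide
  by_cases h8 : c = '\\'; · subst h8; decide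
  simp [pvPad, h1, h2, h3, h4, h5, h6, h7, h8]

-- B's fused fold is A's dedup fold with every kept character padded
theorem pv_fused_eq (cs : List Char) :
    ∀ (accA : List Char) (prev : Option Char),
      cs.foldl
        (fun (st : List (List Char) × Option Char) ch =>
          if some ch = st.2 then st
          else (st.1 ++ [pvPad ch], some ch))
        (accA.map pvPad, prev)
      = (((cs.foldl
            (fun (st : List Char × Option Char) i =>
              if st.2 ≠ some i then (st.1 ++ [i], some i) else st)
            (accA, prev)).1).map pvPad,
          (cs.foldl
            (fun (st : List Char × Option Char) i =>
              if st.2 ≠ some i then (st.1 ++ [i], some i) else st)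
            (accA, prev)).2) := by
  induction cs with
  | nil => intro accA prev; simp
  | cons c t ih =>
      intro accA prev
      by_cases h : prev = some c
      · simp only [List.foldl_cons, h, ne_eq, not_true_eq_false, if_false]
        exact ih accA (some c)
      · have h' : some c ≠ prev := fun hc => h hc.symm
        simp only [List.foldl_cons, if_neg h', ne_eq, h, not_false_eq_true, if_true]
        have := ih (accA ++ [c]) (some c)
        simpa using this

-- ===== VERDICT (by name: the statement is the Claim_ definition above) =====
theorem word_in_message_spec : Claim_equal_word_in_message := by
  intro mess fixing _
  unfold Spec_word_in_message word_in_message word_in_message_alt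
  cases fixing with
  | true => simp
  | false =>
      simp only [beq_self_eq_true, if_pos, bne_self_eq_false, Bool.false_eq_true, if_false]
      have hf := pv_fused_eq (PySem.Str.lower mess).toList ([] : List Char) none
      simp only [List.map_nil] at hf
      rw [hf, pv_chain_eq_flatMap]
      rw [List.flatMap_def]
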